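-- pv_equiv track=rewrite | github.com/pypi-data/pypi-mirror-364 | packages/gway/gway-0.4.57-py3-none-any.whl/gway/console.py | join_unquoted_kwargs
-- ===== SOURCE A (Python) =====
-- def join_unquoted_kwargs(tokens: list[str]) -> list[str]:
--     """Combine values after ``--key`` up to the next dash token.
--
--     This allows passing multi-word strings without quoting as documented
--     in the "Unquoted Kwargs" section of :mod:`README`.
--     """
--     combined: list[str] = []
--     i = 0
--     while i < len(tokens):
--         token = tokens[i]
--         combined.append(token)
--         if token.startswith("--") and "=" not in token:
--             i += 1
--             value_parts = []
--             while i < len(tokens) and not tokens[i].startswith("-"):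
--                 value_parts.append(tokens[i])
--                 i += 1
--             if value_parts:
--                 combined.append(" ".join(value_parts))
--             continue
--         i += 1
--     return combined
-- ===== SOURCE B (Python) =====
-- def join_unquoted_kwargs(tokens: list[str]) -> list[str]:
--     """Combine values after ``--key`` up to the next dash token.
--
--     Single flat pass keeping a buffer of pending value words and a
--     'collecting' flag instead of a nested scanning loop.
--     """
--     out: list[str] = []
--     buf: list[str] = []
--     collecting = False
--     for tok in tokens:
--         if tok.startswith("-"):
--             if buf:
--                 out.append(" ".join(buf))
--                 buf = []
--             out.append(tok)
--             collecting = tok.startswith("--") and "=" not in tok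
--         elif collecting:
--             buf.append(tok)
--         else:
--             out.append(tok)
--     if buf:
--         out.append(" ".join(buf))
--     return out
-- ===== Notes on version B (the rewrite author's own statement) =====
-- stated objective: simpler
-- what changed: Replaced the index-driven outer while with a nested inner scanning while by one flat for-pass over tokens that keeps a pending value buffer and a 'collecting' flag, flushing the buffer at dash tokens and at the end.
import Mathlib
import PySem

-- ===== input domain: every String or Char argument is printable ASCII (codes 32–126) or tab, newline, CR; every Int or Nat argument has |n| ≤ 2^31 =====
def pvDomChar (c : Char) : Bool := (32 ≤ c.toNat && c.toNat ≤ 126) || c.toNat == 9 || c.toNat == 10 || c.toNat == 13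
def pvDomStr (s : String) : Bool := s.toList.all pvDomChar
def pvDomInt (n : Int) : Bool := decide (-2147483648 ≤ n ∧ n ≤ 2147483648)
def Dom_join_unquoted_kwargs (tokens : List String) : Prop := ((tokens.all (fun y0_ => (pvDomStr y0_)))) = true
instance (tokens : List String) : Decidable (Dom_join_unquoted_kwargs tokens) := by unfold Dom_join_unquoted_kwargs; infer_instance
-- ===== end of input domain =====

-- B replaces A's nested scanning while-loop by one flat pass with a pending-value buffer and a collecting flag (simpler decomposition; same O(n) cost).


-- ===== PORT A =====
-- inner 'while i < len(tokens) and not tokens[i].startswith("-")' loop: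
-- returns (value_parts, remaining tokens from the stopping index)
def collectA : List String → List String × List String
  | [] => ([], [])
  | t :: rest =>
    if !(PySem.Str.startswith t "-") then
      let r := collectA rest
      (t :: r.1, r.2)
    else ([], t :: rest)

theorem collectA_snd_length : ∀ (xs : List String), (collectA xs).2.length ≤ xs.length := by
  intro xs
  induction xs with
  | nil => simp [collectA]
  | cons t rest ih =>
    simp only [collectA]
    split
    · simpa using Nat.le_succ_of_le ih
    · simp

-- outer 'while i < len(tokens)' loop of A, as structural recursion on the remaining tokens
def joinLoopA : List String → List String
  | [] => []
  | token :: rest =>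
    if PySem.Str.startswith token "--" && !(PySem.Str.isIn "=" token) then
      let vp := (collectA rest).1
      (token :: (if vp ≠ [] then [PySem.Str.join " " vp] else [])) ++ joinLoopA (collectA rest).2
    else
      token :: joinLoopA rest
termination_by xs => xs.length
decreasing_by
  · simpa using Nat.lt_succ_of_le (collectA_snd_length rest)
  · simp

def join_unquoted_kwargs (tokens : List String) : List String := joinLoopA tokens

-- ===== PORT B =====
-- one step of B's flat for-loop over tokens; state = (out, buf, collecting)
def stepB : List String × List String × Bool → String → List String × List String × Bool
  | (out, buf, collecting), tok =>
    if PySem.Str.startswith tok "-" then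
      ((if buf ≠ [] then out ++ [PySem.Str.join " " buf] else out) ++ [tok], [],
        PySem.Str.startswith tok "--" && !(PySem.Str.isIn "=" tok))
    else if collecting then
      (out, buf ++ [tok], collecting)
    else
      (out ++ [tok], buf, collecting)

def join_unquoted_kwargs_alt (tokens : List String) : List String :=
  let st := tokens.foldl stepB ([], [], false)
  if st.2.1 ≠ [] then st.1 ++ [PySem.Str.join " " st.2.1] else st.1

-- ===== PRECONDITION & SPEC =====
def Spec_join_unquoted_kwargs (tokens : List String) (out : List String) : Prop := out = join_unquoted_kwargs_alt tokens
instance (tokens : List String) (out : List String) : Decidable (Spec_join_unquoted_kwargs tokens out) := by unfold Spec_join_unquoted_kwargs; infer_instance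

-- ===== CLAIM (what is proved, stated in full; the proofs are below) =====
def Claim_equal_join_unquoted_kwargs : Prop := ∀ (tokens : List String), Dom_join_unquoted_kwargs tokens → Spec_join_unquoted_kwargs tokens (join_unquoted_kwargs tokens)

-- ===== LEMMAS AND PROOFS =====

-- flush the pending buffer of a B-state (the 'if buf:' at the end of B and before each dash token)
def flushB (st : List String × List String × Bool) : List String :=
  if st.2.1 ≠ [] then st.1 ++ [PySem.Str.join " " st.2.1] else st.1

theorem joinLoopA_nil : joinLoopA [] = [] := by
  rw [joinLoopA]

theorem joinLoopA_cons (t : String) (rest : List String) :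
    joinLoopA (t :: rest) =
      if PySem.Str.startswith t "--" && !(PySem.Str.isIn "=" t) then
        (t :: (if (collectA rest).1 ≠ [] then [PySem.Str.join " " (collectA rest).1] else []))
          ++ joinLoopA (collectA rest).2
      else t :: joinLoopA rest := by
  rw [joinLoopA]

theorem chars_dash_of_ddash {t : String}
    (h : PySem.Chars.startswith t.toList ['-', '-'] = true) :
    PySem.Chars.startswith t.toList ['-'] = true :=
  (PySem.Chars.startswith_iff _ _).2
    (List.IsPrefix.trans (by decide : (['-'] : List Char) <+: ['-', '-'])
      ((PySem.Chars.startswith_iff _ _).1 h))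

-- the core simultaneous invariant: flushing B's fold from a clean non-collecting
-- state appends exactly A's output, and from a collecting state it first finishes
-- A's inner scan (collectA) into the buffer.
theorem foldB_main : ∀ (xs : List String),
    (∀ out : List String, flushB (xs.foldl stepB (out, [], false)) = out ++ joinLoopA xs) ∧
    (∀ (out buf : List String),
      flushB (xs.foldl stepB (out, buf, true)) =
        (if buf ++ (collectA xs).1 ≠ [] then out ++ [PySem.Str.join " " (buf ++ (collectA xs).1)] else out)
          ++ joinLoopA (collectA xs).2) := by
  intro xs
  induction xs with
  | nil =>
    constructor
    · intro out; simp [flushB, joinLoopA_nil]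
    · intro out buf; simp [flushB, collectA, joinLoopA_nil]
  | cons t rest ih =>
    obtain ⟨ih1, ih2⟩ := ih
    by_cases hd : PySem.Chars.startswith t.toList ['-'] = true
    · -- t is a dash token
      have hcA : collectA (t :: rest) = ([], t :: rest) := by
        simp [collectA, hd]
      by_cases hc : (PySem.Str.startswith t "--" && !(PySem.Str.isIn "=" t)) = true
      · -- dash token that starts a collection
        have hstep : ∀ out buf c, stepB (out, buf, c) t =
            ((if buf ≠ [] then out ++ [PySem.Str.join " " buf] else out) ++ [t], [], true) := by
          intro out buf c
          simp [stepB, hd]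
          simpa using hc
        have hA : joinLoopA (t :: rest) =
            (t :: (if (collectA rest).1 ≠ [] then [PySem.Str.join " " (collectA rest).1] else []))
              ++ joinLoopA (collectA rest).2 := by
          rw [joinLoopA_cons, if_pos hc]
        constructor
        · intro out
          rw [List.foldl_cons, hstep, ih2, hA]
          by_cases hvp : (collectA rest).1 = [] <;> simp [hvp, List.append_assoc]
        · intro out buf
          rw [List.foldl_cons, hstep, ih2]
          by_cases hvp : (collectA rest).1 = [] <;>
            by_cases hb : buf = [] <;> simp [hcA, hA, hvp, hb, List.append_assoc]
      · -- dash token without collection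
        have hstep : ∀ out buf c, stepB (out, buf, c) t =
            ((if buf ≠ [] then out ++ [PySem.Str.join " " buf] else out) ++ [t], [], false) := by
          intro out buf c
          simp [stepB, hd]
          simpa using hc
        have hA : joinLoopA (t :: rest) = t :: joinLoopA rest := by
          rw [joinLoopA_cons, if_neg hc]
        constructor
        · intro out
          rw [List.foldl_cons, hstep, ih1, hA]
          simp [List.append_assoc]
        · intro out buf
          rw [List.foldl_cons, hstep, ih1]
          by_cases hb : buf = [] <;> simp [hcA, hA, hb, List.append_assoc]
    · -- t is a plain word
      have hcA : collectA (t :: rest) = (t :: (collectA rest).1, (collectA rest).2) := by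
        simp [collectA, hd]
      have hc : ¬ (PySem.Str.startswith t "--" && !(PySem.Str.isIn "=" t)) = true := by
        intro h
        have hdd : PySem.Chars.startswith t.toList ['-', '-'] = true := by
          have := Bool.and_elim_left h
          simpa using this
        exact hd (chars_dash_of_ddash hdd)
      have hA : joinLoopA (t :: rest) = t :: joinLoopA rest := by
        rw [joinLoopA_cons, if_neg hc]
      constructor
      · -- top level: appended directly
        intro out
        have hstep : stepB (out, [], false) t = (out ++ [t], [], false) := by
          simp [stepB, hd]
        rw [List.foldl_cons, hstep, ih1, hA]
        simp [List.append_assoc]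
      · -- collecting: goes into the buffer, and collectA prepends it
        intro out buf
        have hstep : stepB (out, buf, true) t = (out, buf ++ [t], true) := by
          simp [stepB, hd]
        rw [List.foldl_cons, hstep, ih2, hcA]
        simp [List.append_assoc]

-- ===== VERDICT (by name: the statement is the Claim_ definition above) =====
theorem join_unquoted_kwargs_spec : Claim_equal_join_unquoted_kwargs := by
  intro tokens _
  unfold Spec_join_unquoted_kwargs join_unquoted_kwargs join_unquoted_kwargs_alt
  have h := (foldB_main tokens).1 []
  simp only [flushB] at h
  simpa using h.symm
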